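-- pv_equiv track=rewrite | github.com/ttzytt/PyAutoGrade | tests/Block 4/tested_code/old/8/Unit 1/Cards/card_functions.py | uno_who_played_what_B1
-- ===== SOURCE A (Python) =====
-- def uno_who_played_what_B1(cards_played, num_players, starting_player):
--     hands = []
--
--     for i in range(0, num_players):
--         hands.append([])
--
--     counter = 0
--     player_counter = 0
--     is_reverse = False
--
--
--     while counter < len(cards_played):
--
--
--         hands[ (player_counter + (starting_player-1)) % num_players ].append(cards_played[ counter ])
--
--         if cards_played[counter] == 'skip':
--             player_counter += 1
--
--
--         elif cards_played[counter] == 'reverse' or is_reverse: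
--
--             if cards_played[counter] == 'reverse' and is_reverse:
--                 is_reverse = False
--             else:
--
--
--                 player_counter -= 2
--                 is_reverse = True
--
--
--         counter += 1
--         player_counter += 1
--
--
--     return hands
-- ===== SOURCE B (Python) =====
-- def uno_who_played_what_B1(cards_played, num_players, starting_player):
--     # Closed-form step rule instead of A's (player_counter, is_reverse) branch
--     # machine: the direction flag equals the parity of preceding 'reverse'
--     # cards, and each card's step is  +2 for 'skip', otherwise +1 exactly when
--     # that parity (odd?) equals whether the card itself is 'reverse', else -1.
--
--     # pass 1: parity of 'reverse' cards strictly before each card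
--     parities = []
--     seen = 0
--     for card in cards_played:
--         parities.append(seen % 2 == 1)
--         if card == 'reverse':
--             seen += 1
--
--     # pass 2: closed-form step size per card
--     deltas = [2 if c == 'skip' else (1 if p == (c == 'reverse') else -1)
--               for c, p in zip(cards_played, parities)]
--
--     # pass 3: owner seat of each card = running sum of steps
--     owners = []
--     pos = starting_player - 1
--     for d in deltas:
--         owners.append(pos % num_players)
--         pos += d
--
--     # pass 4: bucket the cards by owner
--     hands = [[] for _ in range(num_players)]
--     for c, o in zip(cards_played, owners):
--         hands[o].append(c)
--     return hands
-- ===== Notes on version B (the rewrite author's own statement) =====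
-- stated objective: alternative
-- what changed: A simulates a (player_counter, is_reverse) branch machine with the -=2 trick while appending into hands inside one fused while-loop; B replaces that machine by a closed-form step rule - the direction flag is just the parity of preceding 'reverse' cards, and each card steps +2 for 'skip', otherwise +1 iff that parity equals the card being 'reverse' - computed in staged passes (parities, deltas, running-sum owners) before a final bucketing pass.
import Mathlib
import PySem

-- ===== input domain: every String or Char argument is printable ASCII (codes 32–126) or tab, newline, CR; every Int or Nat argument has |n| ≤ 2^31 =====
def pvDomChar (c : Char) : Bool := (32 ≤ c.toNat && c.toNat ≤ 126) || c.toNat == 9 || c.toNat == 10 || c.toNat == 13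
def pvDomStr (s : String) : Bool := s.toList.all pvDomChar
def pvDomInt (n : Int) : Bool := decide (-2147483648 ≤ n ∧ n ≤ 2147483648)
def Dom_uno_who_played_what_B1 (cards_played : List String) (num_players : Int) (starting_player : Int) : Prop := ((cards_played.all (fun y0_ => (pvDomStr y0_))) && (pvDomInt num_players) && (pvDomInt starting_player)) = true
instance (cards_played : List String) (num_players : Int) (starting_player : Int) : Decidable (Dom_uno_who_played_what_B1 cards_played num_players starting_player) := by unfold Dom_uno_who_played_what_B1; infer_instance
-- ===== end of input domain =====

-- B replaces A's fused (player_counter, is_reverse) branch machine by a closed-form step rule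
-- (direction = parity of preceding 'reverse' cards) computed in staged passes; same return value.

-- ===== PORT A =====
-- the while loop: hands[idx].append(card) is pyGetD/pySetD at the Int index
def unoA_loop (num_players starting_player : Int) :
    List String → Int → Bool → List (List String) → List (List String)
  | [], _, _, hands => hands
  | card :: rest, player_counter, is_reverse, hands =>
    let idx := PySem.Int.mod (player_counter + (starting_player - 1)) num_players
    let hands' := PySem.List.pySetD hands idx (PySem.List.pyGetD hands idx [] ++ [card])
    if card = "skip" then
      unoA_loop num_players starting_player rest (player_counter + 1 + 1) is_reverse hands'
    else if card = "reverse" ∨ is_reverse then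
      if card = "reverse" ∧ is_reverse then
        unoA_loop num_players starting_player rest (player_counter + 1) false hands'
      else
        unoA_loop num_players starting_player rest (player_counter - 2 + 1) true hands'
    else
      unoA_loop num_players starting_player rest (player_counter + 1) is_reverse hands'

def uno_who_played_what_B1 (cards_played : List String) (num_players : Int) (starting_player : Int) : List (List String) :=
  let hands := (PySem.List.pyRange 0 num_players 1).foldl (fun h _ => h ++ [([] : List String)]) []
  unoA_loop num_players starting_player cards_played 0 false hands

-- ===== PORT B =====
-- pass 1: parity (odd?) of 'reverse' cards strictly before each card
def unoB_parities : List String → Nat → List Bool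
  | [], _ => []
  | c :: rest, seen =>
    (seen % 2 == 1) :: unoB_parities rest (if c = "reverse" then seen + 1 else seen)

-- pass 2: closed-form step size per card
def unoB_deltas (cards : List String) (parities : List Bool) : List Int :=
  (cards.zip parities).map
    (fun p => if p.1 = "skip" then 2 else if p.2 = decide (p.1 = "reverse") then 1 else -1)

-- pass 3: owner seat of each card = running sum of the steps
def unoB_owners (np : Int) : List Int → Int → List Int
  | [], _ => []
  | d :: rest, pos => PySem.Int.mod pos np :: unoB_owners np rest (pos + d)

-- pass 4: bucket the cards by owner
def unoB_bucket (pairs : List (String × Int)) (hands : List (List String)) : List (List String) :=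
  pairs.foldl
    (fun h p => PySem.List.pySetD h p.2 (PySem.List.pyGetD h p.2 [] ++ [p.1])) hands

def uno_who_played_what_B1_alt (cards_played : List String) (num_players : Int) (starting_player : Int) : List (List String) :=
  let parities := unoB_parities cards_played 0
  let deltas := unoB_deltas cards_played parities
  let owners := unoB_owners num_players deltas (starting_player - 1)
  let hands := (PySem.List.pyRange 0 num_players 1).map (fun _ => ([] : List String))
  unoB_bucket (cards_played.zip owners) hands

-- ===== PRECONDITION & SPEC =====
-- Pre_ excludes exactly the inputs on which the Python A raises: with a card to deal and
-- num_players ≤ 0 it hits `% 0` (ZeroDivisionError) or an append into an empty hands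
-- list (IndexError); B raises the same exceptions there.
def Pre_uno_who_played_what_B1 (cards_played : List String) (num_players : Int) (starting_player : Int) : Prop :=
  cards_played = [] ∨ 1 ≤ num_players
instance (cards_played : List String) (num_players : Int) (starting_player : Int) : Decidable (Pre_uno_who_played_what_B1 cards_played num_players starting_player) := by unfold Pre_uno_who_played_what_B1; infer_instance

def pvWitness_uno_who_played_what_B1 : List String × Int × Int := (["1", "reverse", "skip", "5"], 3, 2)

def Spec_uno_who_played_what_B1 (cards_played : List String) (num_players : Int) (starting_player : Int) (out : List (List String)) : Prop := out = uno_who_played_what_B1_alt cards_played num_players starting_player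
instance (cards_played : List String) (num_players : Int) (starting_player : Int) (out : List (List String)) : Decidable (Spec_uno_who_played_what_B1 cards_played num_players starting_player out) := by unfold Spec_uno_who_played_what_B1; infer_instance

-- ===== CLAIM (what is proved, stated in full; the proofs are below) =====
def Claim_equal_uno_who_played_what_B1 : Prop := ∀ (cards_played : List String) (num_players : Int) (starting_player : Int), Dom_uno_who_played_what_B1 cards_played num_players starting_player → Pre_uno_who_played_what_B1 cards_played num_players starting_player → Spec_uno_who_played_what_B1 cards_played num_players starting_player (uno_who_played_what_B1 cards_played num_players starting_player)

-- ===== LEMMAS AND PROOFS =====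

-- A's state machine, factored into one step function (proved to match A's branches below)
def unoSM_step (pc : Int) (rev : Bool) (card : String) : Int × Bool :=
  if card = "skip" then (pc + 2, rev)
  else if card = "reverse" then (if rev then (pc + 1, false) else (pc - 1, true))
  else if rev then (pc - 1, true)
  else (pc + 1, rev)

-- the owner indices A's loop uses, card by card
def unoSM_owners (np sp : Int) : List String → Int → Bool → List Int
  | [], _, _ => []
  | c :: rest, pc, rev =>
    PySem.Int.mod (pc + (sp - 1)) np ::
      unoSM_owners np sp rest (unoSM_step pc rev c).1 (unoSM_step pc rev c).2

theorem unoA_loop_cons (np sp : Int) (c : String) (rest : List String) (pc : Int) (rev : Bool)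
    (hands : List (List String)) :
    unoA_loop np sp (c :: rest) pc rev hands =
      unoA_loop np sp rest (unoSM_step pc rev c).1 (unoSM_step pc rev c).2
        (PySem.List.pySetD hands (PySem.Int.mod (pc + (sp - 1)) np)
          (PySem.List.pyGetD hands (PySem.Int.mod (pc + (sp - 1)) np) [] ++ [c])) := by
  simp only [unoA_loop, unoSM_step]
  split_ifs with h1 h2 h3 h4 h5 h6 <;> simp_all <;> ring_nf

-- A's fused loop = B's bucketing pass fed with the machine's owner list
theorem unoA_loop_eq_bucket (np sp : Int) :
    ∀ (cards : List String) (pc : Int) (rev : Bool) (hands : List (List String)),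
      unoA_loop np sp cards pc rev hands =
        unoB_bucket (cards.zip (unoSM_owners np sp cards pc rev)) hands := by
  intro cards
  induction cards with
  | nil => intro pc rev hands; rfl
  | cons c rest ih =>
    intro pc rev hands
    rw [unoA_loop_cons, ih]
    rfl

-- B's staged owners coincide with the machine's owners: the direction flag is the parity
-- of 'reverse' cards seen, and the position is pc shifted by (sp - 1)
theorem unoB_owners_eq (np sp : Int) :
    ∀ (cards : List String) (pc : Int) (rev : Bool) (seen : Nat),
      (seen % 2 == 1) = rev →
      unoB_owners np (unoB_deltas cards (unoB_parities cards seen)) (pc + (sp - 1)) =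
        unoSM_owners np sp cards pc rev := by
  intro cards
  induction cards with
  | nil => intro pc rev seen _; rfl
  | cons c rest ih =>
    intro pc rev seen hpar
    simp only [unoB_parities, unoB_deltas, List.zip_cons_cons, List.map, unoB_owners,
      unoSM_owners] at *
    refine congrArg (List.cons _) ?_
    by_cases hskip : c = "skip"
    · have hnr : ¬ c = "reverse" := by simp [hskip]
      rw [if_pos hskip, if_neg hnr,
          show pc + (sp - 1) + 2 = pc + 2 + (sp - 1) by ring]
      simpa [unoSM_step, hskip, hnr] using ih (pc + 2) rev seen hpar
    · by_cases hrev : c = "reverse"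
      · rw [if_neg hskip, if_pos hrev]
        cases rev with
        | true =>
          have hp : seen % 2 = 1 := by simpa using hpar
          have hp' : ((seen + 1) % 2 == 1) = false := by simp [Nat.add_mod, hp]
          have hc : ((seen % 2 == 1) = decide (c = "reverse")) := by simp [hpar, hrev]
          rw [if_pos hc, show pc + (sp - 1) + 1 = pc + 1 + (sp - 1) by ring]
          simpa [unoSM_step, hrev, hskip] using ih (pc + 1) false (seen + 1) hp'
        | false =>
          have hp0 : seen % 2 = 0 := by
            have h1 : ¬ seen % 2 = 1 := by simpa using hpar
            omega
          have hp' : ((seen + 1) % 2 == 1) = true := by simp [Nat.add_mod, hp0]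
          have hc : ¬ ((seen % 2 == 1) = decide (c = "reverse")) := by simp [hpar, hrev]
          rw [if_neg hc, show pc + (sp - 1) + -1 = pc - 1 + (sp - 1) by ring]
          simpa [unoSM_step, hrev, hskip] using ih (pc - 1) true (seen + 1) hp'
      · rw [if_neg hskip, if_neg hrev]
        cases rev with
        | true =>
          have hc : ¬ ((seen % 2 == 1) = decide (c = "reverse")) := by simp [hpar, hrev]
          rw [if_neg hc, show pc + (sp - 1) + -1 = pc - 1 + (sp - 1) by ring]
          simpa [unoSM_step, hrev, hskip] using ih (pc - 1) true seen hpar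
        | false =>
          have hc : ((seen % 2 == 1) = decide (c = "reverse")) := by simp [hpar, hrev]
          rw [if_pos hc, show pc + (sp - 1) + 1 = pc + 1 + (sp - 1) by ring]
          simpa [unoSM_step, hrev, hskip] using ih (pc + 1) false seen hpar

-- the two ways the empty hands list is built coincide
theorem foldl_append_nil_eq_map {α : Type} (l : List α) :
    ∀ (acc : List (List String)),
      l.foldl (fun h _ => h ++ [([] : List String)]) acc = acc ++ l.map (fun _ => []) := by
  induction l with
  | nil => intro acc; simp
  | cons x xs ih => intro acc; simp [List.foldl, ih]

theorem uno_who_played_what_B1_spec : Claim_equal_uno_who_played_what_B1 := by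
  intro cards np sp _ _
  unfold Spec_uno_who_played_what_B1 uno_who_played_what_B1 uno_who_played_what_B1_alt
  rw [foldl_append_nil_eq_map, List.nil_append, unoA_loop_eq_bucket]
  have h0 : (0 : Int) + (sp - 1) = sp - 1 := by ring
  rw [← unoB_owners_eq np sp cards 0 false 0 (by decide), h0]
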